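-- pv_equiv track=rewrite | github.com/tejas-kale-coditas/codewars_aman_pratiksha | codewars/pratiksha/28-08-25_ATM_Heist.py | maximum_thrill
-- ===== SOURCE A (Python) =====
-- def maximum_thrill(atms):
--     n = len(atms)
--     max_thrill = 0
--
--     for i in range(n):
--         for j in range(i, n):
--             thrill = atms[i] + atms[j] + abs(i - j)
--             if thrill > max_thrill:
--                 max_thrill = thrill
--
--     return max_thrill
-- ===== SOURCE B (Python) =====
-- def maximum_thrill(atms):
--     res = 0
--     best = None  # max over seen indices i of atms[i] - i
--     j = 0
--     for v in atms:
--         d = v - j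
--         if best is None or d > best:
--             best = d
--         cand = best + v + j
--         if cand > res:
--             res = cand
--         j += 1
--     return res
-- ===== Notes on version B (the rewrite author's own statement) =====
-- stated objective: faster
-- what changed: replaced the O(n^2) scan over all index pairs by a single pass that keeps the running maximum of atms[i]-i and combines it with atms[j]+j at each j
import Mathlib
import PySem

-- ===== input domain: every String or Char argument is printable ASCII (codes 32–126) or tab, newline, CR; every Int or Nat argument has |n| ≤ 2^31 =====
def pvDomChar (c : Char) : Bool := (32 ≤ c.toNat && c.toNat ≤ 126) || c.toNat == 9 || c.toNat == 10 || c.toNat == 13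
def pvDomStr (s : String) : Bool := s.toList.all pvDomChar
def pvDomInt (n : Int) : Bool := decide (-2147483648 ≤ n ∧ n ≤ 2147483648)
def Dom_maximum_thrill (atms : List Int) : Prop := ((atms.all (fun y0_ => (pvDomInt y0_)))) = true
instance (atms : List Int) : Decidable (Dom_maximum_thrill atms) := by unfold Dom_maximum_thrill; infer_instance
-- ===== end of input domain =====

-- B replaces A's O(n^2) scan over all index pairs by a single pass keeping the running
-- maximum of atms[i]-i and combining it with atms[j]+j at each j (faster).

-- ===== PORT A =====
def maximum_thrill (atms : List Int) : Int :=
  let n : Int := atms.length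
  (PySem.List.pyRange 0 n 1).foldl (fun max_thrill i =>
    (PySem.List.pyRange i n 1).foldl (fun max_thrill j =>
      let thrill := PySem.List.pyGetD atms i 0 + PySem.List.pyGetD atms j 0 + |i - j|
      if thrill > max_thrill then thrill else max_thrill) max_thrill) 0

-- ===== PORT B =====
-- the 'for v in atms' loop of Source B, with its three loop variables res, j, best
def altLoop : List Int → Int → Int → Option Int → Int
  | [], res, _, _ => res
  | v :: rest, res, j, best =>
    let d := v - j
    let b := match best with
      | none => d
      | some b0 => if d > b0 then d else b0
    let cand := b + v + j
    altLoop rest (if cand > res then cand else res) (j + 1) (some b)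

def maximum_thrill_alt (atms : List Int) : Int := altLoop atms 0 0 none

-- ===== PRECONDITION & SPEC =====
def Spec_maximum_thrill (atms : List Int) (out : Int) : Prop := out = maximum_thrill_alt atms
instance (atms : List Int) (out : Int) : Decidable (Spec_maximum_thrill atms out) := by unfold Spec_maximum_thrill; infer_instance

-- ===== CLAIM (what is proved, stated in full; the proofs are below) =====
def Claim_equal_maximum_thrill : Prop := ∀ (atms : List Int), Dom_maximum_thrill atms → Spec_maximum_thrill atms (maximum_thrill atms)

-- ===== LEMMAS AND PROOFS =====

-- abbreviations for the proofs: element access and the pair value A maximises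
def gI (xs : List Int) (i : Int) : Int := PySem.List.pyGetD xs i 0
def fP (xs : List Int) (i u : Int) : Int := gI xs i + gI xs u + (u - i)

lemma if_gt_eq_max (a b : Int) : (if b > a then b else a) = max a b := by
  rw [max_def]; split_ifs <;> omega

-- A's inner loop is a running max over the mapped list
lemma foldl_if_gt_eq_foldl_max_map (f : Int → Int) (L : List Int) (a : Int) :
    L.foldl (fun mt j => if f j > mt then f j else mt) a = (L.map f).foldl max a := by
  induction L generalizing a with
  | nil => rfl
  | cons x t _ => simp only [List.foldl_cons, List.map_cons, if_gt_eq_max, List.foldl_map]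

lemma foldl_foldl_max_eq_flatMap (g : Int → List Int) (L : List Int) (a : Int) :
    L.foldl (fun acc i => (g i).foldl max acc) a = (L.flatMap g).foldl max a := by
  induction L generalizing a with
  | nil => rfl
  | cons x t ih => simp only [List.foldl_cons, List.flatMap_cons, List.foldl_append, ih]

-- the list of all values A compares
def candA (xs : List Int) : List Int :=
  (PySem.List.pyRange 0 (xs.length : Int) 1).flatMap (fun i =>
    (PySem.List.pyRange i (xs.length : Int) 1).map (fun u => gI xs i + gI xs u + |i - u|))

lemma A_eq_foldl (xs : List Int) : maximum_thrill xs = (candA xs).foldl max 0 := by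
  unfold maximum_thrill candA
  rw [← foldl_foldl_max_eq_flatMap]
  exact PySem.List.foldl_congr_mem _ _ _ _ (fun acc i _ => foldl_if_gt_eq_foldl_max_map _ _ acc)

lemma mem_candA (xs : List Int) (c : Int) :
    c ∈ candA xs ↔ ∃ i u, 0 ≤ i ∧ i ≤ u ∧ u < (xs.length : Int) ∧ c = fP xs i u := by
  unfold candA
  simp only [List.mem_flatMap, List.mem_map, PySem.List.mem_pyRange_one]
  constructor
  · rintro ⟨i, ⟨hi0, hin⟩, u, ⟨hiu, hun⟩, rfl⟩
    exact ⟨i, u, hi0, hiu, hun, by unfold fP; rw [abs_of_nonpos (by omega)]; ring⟩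
  · rintro ⟨i, u, hi0, hiu, hun, rfl⟩
    exact ⟨i, ⟨hi0, by omega⟩, u, ⟨hiu, hun⟩, by unfold fP; rw [abs_of_nonpos (by omega)]; ring⟩

-- B's loop as a running max over its candidate list
def candB : Int → Int → List Int → List Int
  | _, _, [] => []
  | b, j, v :: rest => (max b (v - j) + v + j) :: candB (max b (v - j)) (j + 1) rest

lemma altLoop_eq_foldl (ys : List Int) : ∀ (res j b : Int),
    altLoop ys res j (some b) = (candB b j ys).foldl max res := by
  induction ys with
  | nil => intro res j b; rfl
  | cons v rest ih =>
    intro res j b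
    simp only [altLoop, candB, List.foldl_cons, ih]
    rw [if_gt_eq_max, if_gt_eq_max]

-- every candidate of B is one of A's pair values
lemma candB_mem (xs : List Int) : ∀ (ys : List Int) (j b : Int), 0 ≤ j →
    ys = xs.drop j.toNat →
    (∃ i, 0 ≤ i ∧ i < j ∧ b = gI xs i - i) →
    ∀ c ∈ candB b j ys, ∃ i u, 0 ≤ i ∧ i ≤ u ∧ u < (xs.length : Int) ∧ c = fP xs i u := by
  intro ys
  induction ys with
  | nil => intro j b _ _ _ c hc; simp [candB] at hc
  | cons v rest ih =>
    intro j b hj hdrop hatt c hc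
    have h? : xs[j.toNat]? = some v := by rw [← List.head?_drop, ← hdrop]; rfl
    obtain ⟨hjlen, hv⟩ := List.getElem?_eq_some_iff.mp h?
    have hgj : gI xs j = v := by
      rw [gI, PySem.List.pyGetD_eq_getElem xs 0 hj (by omega), hv]
    have hrest : rest = xs.drop (j + 1).toNat := by
      rw [show (j + 1).toNat = j.toNat + 1 by omega, ← List.tail_drop, ← hdrop]; rfl
    have hatt' : ∃ i, 0 ≤ i ∧ i < j + 1 ∧ max b (v - j) = gI xs i - i := by
      rcases max_choice b (v - j) with h | h
      · obtain ⟨i, hi0, hij, hbi⟩ := hatt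
        exact ⟨i, hi0, by omega, by rw [h, hbi]⟩
      · exact ⟨j, hj, by omega, by rw [h, hgj]⟩
    simp only [candB, List.mem_cons] at hc
    rcases hc with rfl | hc
    · obtain ⟨i, hi0, hij, hbi⟩ := hatt'
      refine ⟨i, j, hi0, by omega, by omega, ?_⟩
      rw [fP, hbi, hgj]; ring
    · exact ih (j + 1) (max b (v - j)) (by omega) hrest hatt' c hc

-- every pair value of A with second index ≥ j is dominated by some candidate of B
lemma candB_cover (xs : List Int) : ∀ (ys : List Int) (j b : Int), 0 ≤ j →
    ys = xs.drop j.toNat →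
    (∀ i, 0 ≤ i → i < j → gI xs i - i ≤ b) →
    ∀ i u, 0 ≤ i → i ≤ u → j ≤ u → u < (xs.length : Int) →
      ∃ c ∈ candB b j ys, fP xs i u ≤ c := by
  intro ys
  induction ys with
  | nil =>
    intro j b hj hdrop _ i u _ _ hju hun
    have := List.drop_eq_nil_iff.mp hdrop.symm
    omega
  | cons v rest ih =>
    intro j b hj hdrop hbd i u hi0 hiu hju hun
    have h? : xs[j.toNat]? = some v := by rw [← List.head?_drop, ← hdrop]; rfl
    obtain ⟨hjlen, hv⟩ := List.getElem?_eq_some_iff.mp h?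
    have hgj : gI xs j = v := by
      rw [gI, PySem.List.pyGetD_eq_getElem xs 0 hj (by omega), hv]
    have hrest : rest = xs.drop (j + 1).toNat := by
      rw [show (j + 1).toNat = j.toNat + 1 by omega, ← List.tail_drop, ← hdrop]; rfl
    have hbd' : ∀ i', 0 ≤ i' → i' < j + 1 → gI xs i' - i' ≤ max b (v - j) := by
      intro i' h0 h1
      rcases lt_or_ge i' j with h | h
      · exact le_trans (hbd i' h0 h) (le_max_left _ _)
      · have : i' = j := by omega
        subst this
        rw [hgj]; exact le_max_right _ _
    rcases eq_or_lt_of_le hju with heq | hju'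
    · subst heq
      refine ⟨max b (v - j) + v + j, by simp [candB], ?_⟩
      have hle := hbd' i hi0 (by omega)
      rw [fP, hgj]
      linarith
    · obtain ⟨c, hc, hle⟩ := ih (j + 1) (max b (v - j)) (by omega) hrest hbd' i u hi0 hiu (by omega) hun
      exact ⟨c, by simp [candB, hc], hle⟩

lemma main_eq (xs : List Int) : maximum_thrill xs = maximum_thrill_alt xs := by
  cases xs with
  | nil => decide
  | cons v rest =>
    set xs := v :: rest with hxs
    have hBeq : maximum_thrill_alt xs = (candB v 1 rest).foldl max (max 0 (v + v + 0)) := by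
      show altLoop (v :: rest) 0 0 none = _
      simp only [altLoop, altLoop_eq_foldl, if_gt_eq_max]
      norm_num
    have hg0 : gI xs 0 = v := by rw [gI, hxs, PySem.List.pyGetD_zero_cons]
    have hrest : rest = xs.drop (1 : Int).toNat := by rw [hxs]; rfl
    have hatt : ∃ i, 0 ≤ i ∧ i < 1 ∧ (v : Int) = gI xs i - i := by
      exact ⟨0, le_refl _, by omega, by rw [hg0]; ring⟩
    have hbd : ∀ i, 0 ≤ i → i < 1 → gI xs i - i ≤ v := by
      intro i h0 h1
      have : i = 0 := by omega
      subst this; rw [hg0]; omega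
    have hlen : (0 : Int) < (xs.length : Int) := by rw [hxs]; simp
    -- facts about A
    rw [A_eq_foldl, hBeq]
    have hAfacts := PySem.List.le_foldl_max (candA xs) 0
    have hAmem := PySem.List.foldl_max_mem (candA xs) 0
    have hBfacts := PySem.List.le_foldl_max (candB v 1 rest) (max 0 (v + v + 0))
    have hBmem := PySem.List.foldl_max_mem (candB v 1 rest) (max 0 (v + v + 0))
    apply le_antisymm
    · -- A ≤ B
      rcases hAmem with h0 | hmem
      · rw [h0]
        calc (0 : Int) ≤ max 0 (v + v + 0) := le_max_left _ _
          _ ≤ _ := hBfacts.1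
      · obtain ⟨i, u, hi0, hiu, hun, hc⟩ := (mem_candA xs _).mp hmem
        rw [hc]
        rcases lt_or_ge u 1 with hu1 | hu1
        · have hu0 : u = 0 := by omega
          have hi00 : i = 0 := by omega
          subst hu0; subst hi00
          calc fP xs 0 0 ≤ max 0 (v + v + 0) := by
                rw [fP, hg0]; have := le_max_right (0 : Int) (v + v + 0); omega
            _ ≤ _ := hBfacts.1
        · obtain ⟨c, hcmem, hle⟩ := candB_cover xs rest 1 v (by omega) hrest hbd i u hi0 hiu hu1 hun
          exact le_trans hle (hBfacts.2 c hcmem)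
    · -- B ≤ A
      rcases hBmem with h0 | hmem
      · rw [h0]
        have hf00 : fP xs 0 0 ∈ candA xs :=
          (mem_candA xs _).mpr ⟨0, 0, le_refl _, le_refl _, hlen, rfl⟩
        have h1 : fP xs 0 0 ≤ (candA xs).foldl max 0 := hAfacts.2 _ hf00
        have h2 : (0 : Int) ≤ (candA xs).foldl max 0 := hAfacts.1
        rw [fP, hg0] at h1
        rcases max_choice (0 : Int) (v + v + 0) with h | h <;> rw [h] <;> omega
      · obtain ⟨i, u, hi0, hiu, hun, hc⟩ := candB_mem xs rest 1 v (by omega) hrest hatt _ hmem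
        rw [hc]
        exact hAfacts.2 _ ((mem_candA xs _).mpr ⟨i, u, hi0, hiu, hun, rfl⟩)

-- ===== VERDICT (by name: the statement is the Claim_ definition above) =====
theorem maximum_thrill_spec : Claim_equal_maximum_thrill := by
  intro atms _
  exact main_eq atms
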